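-- pv_equiv track=rewrite | github.com/Lillliant/Prisoner-Dilemma-Optimization | src/Tabu.py | evaluate_strategy
-- ===== SOURCE A (Python) =====
-- PAYOFF_MATRIX = {
--     ('C', 'C'): (3, 3),  # Reward for mutual cooperation
--     ('C', 'D'): (0, 5),  # Sucker's payoff and temptation to defect
--     ('D', 'C'): (5, 0),  # Temptation and sucker's payoff (swapped)
--     ('D', 'D'): (1, 1)   # Punishment for mutual defection
-- }
--
-- def binary_to_strategy(binary_str):
--     """ Convert binary string to strategy sequence ('C' or 'D') """
--     return ['C' if bit == '0' else 'D' for bit in binary_str]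
--
-- def evaluate_strategy(strategy, opponent_strategy, rounds=10):
--     """ Simulate a game and compute total score """
--     strategy_moves = binary_to_strategy(strategy)
--     opponent_moves = binary_to_strategy(opponent_strategy)
--
--     score = 0
--     for i in range(rounds):
--         my_move = strategy_moves[i % len(strategy_moves)]
--         opp_move = opponent_moves[i % len(opponent_moves)]
--         score += PAYOFF_MATRIX[(my_move, opp_move)][0]  # Take first player's score
--     return score
-- ===== SOURCE B (Python) =====
-- PAYOFF_MATRIX = {
--     ('C', 'C'): (3, 3),
--     ('C', 'D'): (0, 5),
--     ('D', 'C'): (5, 0),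
--     ('D', 'D'): (1, 1)
-- }
--
-- def _gcd(a, b):
--     while b:
--         a, b = b, a % b
--     return a
--
-- def evaluate_strategy(strategy, opponent_strategy, rounds=10):
--     """ Closed form: sum one lcm-length cycle of payoffs, then multiply by the
--     number of full cycles and add the leftover prefix. """
--     if rounds <= 0:
--         return 0
--     m, n = len(strategy), len(opponent_strategy)
--     period = m * n // _gcd(m, n)  # lcm; ZeroDivisionError on empty strategy, like A
--     cycle = [PAYOFF_MATRIX[('C' if strategy[i % m] == '0' else 'D',
--                             'C' if opponent_strategy[i % n] == '0' else 'D')][0]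
--              for i in range(period)]
--     full, rem = divmod(rounds, period)
--     return full * sum(cycle) + sum(cycle[:rem])
-- ===== Notes on version B (the rewrite author's own statement) =====
-- stated objective: alternative
-- what changed: A sums the payoff round by round over range(rounds); B computes a closed form: it builds one lcm(len(strategy),len(opponent))-length cycle of payoffs once and returns full_cycles * cycle_sum + prefix_sum via divmod.
import Mathlib
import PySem

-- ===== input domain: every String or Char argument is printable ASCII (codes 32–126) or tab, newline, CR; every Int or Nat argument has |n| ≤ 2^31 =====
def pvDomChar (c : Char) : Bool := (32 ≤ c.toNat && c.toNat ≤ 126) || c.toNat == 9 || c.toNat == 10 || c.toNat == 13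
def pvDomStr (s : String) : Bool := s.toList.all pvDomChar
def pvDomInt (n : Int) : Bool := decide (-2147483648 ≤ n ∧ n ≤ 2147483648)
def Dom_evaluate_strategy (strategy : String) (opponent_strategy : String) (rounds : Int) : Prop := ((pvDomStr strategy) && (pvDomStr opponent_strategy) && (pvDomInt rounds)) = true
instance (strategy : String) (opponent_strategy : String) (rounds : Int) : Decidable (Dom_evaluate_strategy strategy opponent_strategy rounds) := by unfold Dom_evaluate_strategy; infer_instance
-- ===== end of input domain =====

-- B replaces A's round-by-round loop by a closed form: it sums one lcm(|s|,|o|)-length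
-- cycle of payoffs and combines full cycles and the leftover prefix arithmetically.

-- ===== PORT A =====
def pvPayoffMatrix : PySem.Dict (Char × Char) (Int × Int) :=
  PySem.Dict.ofList [(('C','C'),(3,3)), (('C','D'),(0,5)), (('D','C'),(5,0)), (('D','D'),(1,1))]

def binary_to_strategy (binary_str : String) : List Char :=
  binary_str.toList.map (fun bit => if bit = '0' then 'C' else 'D')

def evaluate_strategy (strategy : String) (opponent_strategy : String) (rounds : Int) : Int :=
  let strategy_moves := binary_to_strategy strategy
  let opponent_moves := binary_to_strategy opponent_strategy
  (PySem.List.pyRange 0 rounds 1).foldl (fun score i =>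
    let my_move := PySem.List.pyGetD strategy_moves (PySem.Int.mod i (strategy_moves.length : Int)) 'C'
    let opp_move := PySem.List.pyGetD opponent_moves (PySem.Int.mod i (opponent_moves.length : Int)) 'C'
    score + (PySem.Dict.getD pvPayoffMatrix (my_move, opp_move) (0,0)).1) 0

-- ===== PORT B =====
-- helper _gcd of Source B (Euclid loop); terminates because |b| strictly shrinks
def pvGcd (a b : Int) : Int :=
  if hb : b = 0 then a else pvGcd b (PySem.Int.mod a b)
termination_by b.natAbs
decreasing_by
  rcases lt_or_gt_of_ne hb with h | h
  · have h1 := (PySem.Int.mod_neg_bounds a h).1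
    have h2 := (PySem.Int.mod_neg_bounds a h).2
    omega
  · have h1 := PySem.Int.mod_nonneg a h
    have h2 := PySem.Int.mod_lt a h
    omega

def evaluate_strategy_alt (strategy : String) (opponent_strategy : String) (rounds : Int) : Int :=
  if rounds ≤ 0 then 0
  else
    let m : Int := PySem.Str.len strategy
    let n : Int := PySem.Str.len opponent_strategy
    let period := PySem.Int.floordiv (m * n) (pvGcd m n)
    let cycle := (PySem.List.pyRange 0 period 1).map (fun i =>
      (PySem.Dict.getD pvPayoffMatrix
        ((if PySem.List.pyGetD strategy.toList (PySem.Int.mod i m) '0' = '0' then 'C' else 'D'),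
         (if PySem.List.pyGetD opponent_strategy.toList (PySem.Int.mod i n) '0' = '0' then 'C' else 'D'))
        (0,0)).1)
    let full := PySem.Int.floordiv rounds period
    let rem := PySem.Int.mod rounds period
    full * cycle.sum + (PySem.List.slice cycle none (some rem)).sum

-- ===== PRECONDITION & SPEC =====
-- Pre_ excludes exactly the inputs where A raises ZeroDivisionError ('i % 0' when
-- rounds > 0 and a strategy string is empty); B raises there too (division by lcm 0).
def Pre_evaluate_strategy (strategy : String) (opponent_strategy : String) (rounds : Int) : Prop :=
  rounds ≤ 0 ∨ (strategy ≠ "" ∧ opponent_strategy ≠ "")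
instance (strategy : String) (opponent_strategy : String) (rounds : Int) : Decidable (Pre_evaluate_strategy strategy opponent_strategy rounds) := by unfold Pre_evaluate_strategy; infer_instance

def pvWitness_evaluate_strategy : String × String × Int := ("010", "1", 7)

def Spec_evaluate_strategy (strategy : String) (opponent_strategy : String) (rounds : Int) (out : Int) : Prop := out = evaluate_strategy_alt strategy opponent_strategy rounds
instance (strategy : String) (opponent_strategy : String) (rounds : Int) (out : Int) : Decidable (Spec_evaluate_strategy strategy opponent_strategy rounds out) := by unfold Spec_evaluate_strategy; infer_instance

-- ===== CLAIM (what is proved, stated in full; the proofs are below) =====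
def Claim_equal_evaluate_strategy : Prop := ∀ (strategy : String) (opponent_strategy : String) (rounds : Int), Dom_evaluate_strategy strategy opponent_strategy rounds → Pre_evaluate_strategy strategy opponent_strategy rounds → Spec_evaluate_strategy strategy opponent_strategy rounds (evaluate_strategy strategy opponent_strategy rounds)

-- ===== LEMMAS AND PROOFS =====

-- the per-round payoff both programs compute at (Nat) round k
def pvF (s o : String) (k : Nat) : Int :=
  (PySem.Dict.getD pvPayoffMatrix
    ((if s.toList.getD (k % s.toList.length) '0' = '0' then 'C' else 'D'),
     (if o.toList.getD (k % o.toList.length) '0' = '0' then 'C' else 'D')) (0,0)).1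

-- sum of an L-periodic function over range r = (full cycles) * (cycle sum) + prefix sum
theorem pv_periodic_sum (f : Nat → Int) (L : Nat) (hL : 0 < L)
    (hf : ∀ k, f k = f (k % L)) (r : Nat) :
    ((List.range r).map f).sum =
      ((r / L : Nat) : Int) * ((List.range L).map f).sum +
        ((List.range (r % L)).map f).sum := by
  induction r with
  | zero => simp
  | succ r ih =>
    have hm : r % L < L := Nat.mod_lt _ hL
    have hdm := Nat.div_add_mod r L
    rw [List.range_succ, List.map_append, List.sum_append, ih]
    simp only [List.map_cons, List.map_nil, List.sum_cons, List.sum_nil, add_zero]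
    rw [hf r]
    by_cases h : r % L + 1 = L
    · have e : r + 1 = L * (r / L) + L := by omega
      have hdiv : (r + 1) / L = r / L + 1 := by
        rw [e, Nat.mul_add_div hL, Nat.div_self hL]
      have hmod : (r + 1) % L = 0 := by
        rw [e, Nat.mul_add_mod]; exact Nat.mod_self L
      have hsum : ((List.range L).map f).sum
          = ((List.range (r % L)).map f).sum + f (r % L) := by
        conv_lhs => rw [← h]
        rw [List.range_succ, List.map_append, List.sum_append]
        simp
      rw [hdiv, hmod, hsum]
      push_cast
      simp only [List.range_zero, List.map_nil, List.sum_nil, add_zero]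
      ring
    · have e : r + 1 = L * (r / L) + (r % L + 1) := by omega
      have hdiv : (r + 1) / L = r / L := by
        have h0 : (r % L + 1) / L = 0 := Nat.div_eq_of_lt (by omega)
        rw [e, Nat.mul_add_div hL, h0, Nat.add_zero]
      have hmod : (r + 1) % L = r % L + 1 := by
        rw [e, Nat.mul_add_mod, Nat.mod_eq_of_lt (by omega)]
      rw [hdiv, hmod, List.range_succ, List.map_append, List.sum_append]
      simp only [List.map_cons, List.map_nil, List.sum_cons, List.sum_nil, add_zero]
      ring

-- the Euclid loop on Nat casts computes Nat.gcd
theorem pvGcd_natCast (b a : Nat) : pvGcd (a : Int) (b : Int) = (Nat.gcd a b : Int) := by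
  induction b using Nat.strong_induction_on generalizing a with
  | _ b ih =>
    rw [pvGcd]
    by_cases hb : b = 0
    · subst hb; simp
    · rw [dif_neg (by exact_mod_cast hb), PySem.Int.mod_natCast,
        ih (a % b) (Nat.mod_lt _ (Nat.pos_of_ne_zero hb)) b,
        Nat.gcd_comm b (a % b), ← Nat.gcd_rec b a, Nat.gcd_comm b a]

-- A's loop totals the per-round payoffs
theorem pv_A_eval (s o : String) (R : Nat)
    (hm : 0 < s.toList.length) (hn : 0 < o.toList.length) :
    evaluate_strategy s o (R : Int) = ((List.range R).map (pvF s o)).sum := by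
  unfold evaluate_strategy binary_to_strategy
  rw [PySem.List.pyRange_zero_nat, List.foldl_map, PySem.List.foldl_add, zero_add]
  congr 1
  apply List.map_congr_left
  intro k _
  have hkm : k % s.toList.length < (s.toList.map (fun bit => if bit = '0' then 'C' else 'D')).length := by
    simpa using Nat.mod_lt k hm
  have hkn : k % o.toList.length < (o.toList.map (fun bit => if bit = '0' then 'C' else 'D')).length := by
    simpa using Nat.mod_lt k hn
  simp only [List.length_map, PySem.Int.mod_natCast, PySem.List.pyGetD_natCast,
    List.getD_eq_getElem _ _ hkm, List.getD_eq_getElem _ _ hkn, List.getElem_map, pvF]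
  rw [List.getD_eq_getElem s.toList '0' (Nat.mod_lt k hm),
    List.getD_eq_getElem o.toList '0' (Nat.mod_lt k hn)]

-- B's closed form, written over Nat.lcm
theorem pv_B_eval (s o : String) (R : Nat) (hR : 0 < R)
    (hm : 0 < s.toList.length) (hn : 0 < o.toList.length) :
    evaluate_strategy_alt s o (R : Int) =
      ((R / Nat.lcm s.toList.length o.toList.length : Nat) : Int) *
          ((List.range (Nat.lcm s.toList.length o.toList.length)).map (pvF s o)).sum +
        ((List.range (R % Nat.lcm s.toList.length o.toList.length)).map (pvF s o)).sum := by
  have hlcm : 0 < Nat.lcm s.toList.length o.toList.length := Nat.lcm_pos hm hn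
  have hB : ((fun i : Int =>
      (PySem.Dict.getD pvPayoffMatrix
        ((if PySem.List.pyGetD s.toList (PySem.Int.mod i (s.toList.length : Int)) '0' = '0' then 'C' else 'D'),
         (if PySem.List.pyGetD o.toList (PySem.Int.mod i (o.toList.length : Int)) '0' = '0' then 'C' else 'D'))
        (0,0)).1) ∘ (fun k : Nat => (k : Int))) = pvF s o := by
    funext k
    simp only [Function.comp_apply, PySem.Int.mod_natCast, PySem.List.pyGetD_natCast]
    rfl
  simp only [evaluate_strategy_alt]
  rw [if_neg (by omega), PySem.Str.len_eq, PySem.Str.len_eq, pvGcd_natCast,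
    ← Nat.cast_mul, PySem.Int.floordiv_natCast, ← Nat.lcm_eq_mul_div,
    PySem.List.pyRange_zero_nat, List.map_map, hB,
    PySem.Int.floordiv_natCast, PySem.Int.mod_natCast, PySem.List.slice_to_natCast,
    ← List.map_take, List.take_range, Nat.min_eq_left (le_of_lt (Nat.mod_lt R hlcm))]

-- ===== VERDICT (by name: the statement is the Claim_ definition above) =====
theorem evaluate_strategy_spec : Claim_equal_evaluate_strategy := by
  intro s o rounds _ hpre
  unfold Spec_evaluate_strategy
  rcases le_or_gt rounds 0 with hr | hr
  · unfold evaluate_strategy evaluate_strategy_alt binary_to_strategy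
    rw [PySem.List.pyRange_one_eq_nil hr]
    simp [hr]
  · have hso : s ≠ "" ∧ o ≠ "" := hpre.resolve_left (by omega)
    have hm : 0 < s.toList.length :=
      List.length_pos_iff.mpr (fun h => hso.1 (String.toList_eq_nil_iff.mp h))
    have hn : 0 < o.toList.length :=
      List.length_pos_iff.mpr (fun h => hso.2 (String.toList_eq_nil_iff.mp h))
    have hRr : rounds = ((rounds.toNat : Nat) : Int) := (Int.toNat_of_nonneg hr.le).symm
    rw [hRr, pv_A_eval s o _ hm hn, pv_B_eval s o _ (by omega) hm hn]
    exact pv_periodic_sum (pvF s o) _ (Nat.lcm_pos hm hn)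
      (fun k => by
        unfold pvF
        rw [Nat.mod_mod_of_dvd k (Nat.dvd_lcm_left _ _),
          Nat.mod_mod_of_dvd k (Nat.dvd_lcm_right _ _)]) _
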